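-- pv_equiv track=rewrite | github.com/pilagod/leetcode-python | google-code-jam-round1-2016/A.py | getLastWord
-- ===== SOURCE A (Python) =====
-- def getLastWord(word):
--     curMax = 0
--     result = []
--     wordList = list(word)
--     for i in range(len(wordList)):
--         if len(result) == 0:
--             result.append(wordList[i])
--             curMax = ord(wordList[i])
--             continue
--         else:
--             if ord(wordList[i]) >= curMax:
--                 result.insert(0, wordList[i])
--                 curMax = ord(wordList[i])
--             else:
--                 result.append(wordList[i])
--
--     return ''.join(result)
-- ===== SOURCE B (Python) =====
-- def getLastWord(word):
--     n = len(word)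
--     # pass 1: exclusive prefix maxima of the character codes
--     pmax = [0] * n
--     m = 0
--     for i in range(n):
--         pmax[i] = m
--         o = ord(word[i])
--         if o > m:
--             m = o
--     # pass 2: fill a preallocated buffer from both ends, scanning right-to-left:
--     # running-max characters go to the next free slot on the left (last such char
--     # ends up first), the rest to the next free slot on the right.
--     out = [''] * n
--     lo, hi = 0, n - 1
--     for i in range(n - 1, -1, -1):
--         c = word[i]
--         if ord(c) >= pmax[i]:
--             out[lo] = c
--             lo += 1
--         else:
--             out[hi] = c
--             hi -= 1
--     return ''.join(out)
-- ===== Notes on version B (the rewrite author's own statement) =====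
-- stated objective: faster
-- what changed: B is a two-pass algorithm: it first precomputes the exclusive prefix-maximum array of character codes, then fills a preallocated output buffer from both ends with two pointers while scanning the word right-to-left, instead of A's single left-to-right pass that does O(n) insert(0) into one growing result list.
import Mathlib
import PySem

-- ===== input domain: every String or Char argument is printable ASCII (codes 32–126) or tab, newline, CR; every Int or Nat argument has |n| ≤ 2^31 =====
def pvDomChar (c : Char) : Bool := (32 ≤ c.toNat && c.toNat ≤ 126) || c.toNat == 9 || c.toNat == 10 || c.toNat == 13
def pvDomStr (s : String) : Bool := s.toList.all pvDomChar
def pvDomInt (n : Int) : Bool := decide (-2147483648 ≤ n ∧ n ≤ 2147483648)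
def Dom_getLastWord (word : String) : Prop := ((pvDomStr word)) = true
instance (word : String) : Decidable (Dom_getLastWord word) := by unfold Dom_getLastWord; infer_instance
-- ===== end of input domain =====

-- B replaces A's single pass with O(n) insert(0) by two passes: precompute the
-- exclusive prefix-maximum array, then fill a preallocated buffer from both ends
-- with two pointers while scanning right-to-left (objective: faster).

-- ===== PORT A =====
-- the for-loop of A: state (curMax, result); insert(0,·) = cons, append = ++ [·]
def getLastWordLoopA : List Char → Int → List Char → List Char
  | [], _, result => result
  | c :: cs, curMax, result =>
    if result = [] then
      getLastWordLoopA cs (Int.ofNat c.toNat) (result ++ [c])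
    else
      if (Int.ofNat c.toNat) ≥ curMax then
        getLastWordLoopA cs (Int.ofNat c.toNat) (c :: result)
      else
        getLastWordLoopA cs curMax (result ++ [c])

def getLastWord (word : String) : String :=
  String.ofList (getLastWordLoopA word.toList 0 [])

-- ===== PORT B =====
-- B's first loop: pmax[i] = m, then m updated with ord(word[i]) if larger;
-- ported as a recursion emitting the pmax entries in order.
def pmaxLoopB : List Char → Int → List Int
  | [], _ => []
  | c :: cs, m => m :: pmaxLoopB cs (if Int.ofNat c.toNat > m then Int.ofNat c.toNat else m)

-- B's second loop: for i in range(n-1,-1,-1) visits the pairs (word[i], pmax[i])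
-- of (wl.zip pm).reverse; out[''] slots are char-lists ([] = the '' placeholder);
-- lo/hi are the Python ints (hi ≥ 0 whenever the else branch fires, see fill_spec,
-- so .toNat is exact there).
def fillLoopB : List (Char × Int) → List (List Char) → Int → Int → List (List Char)
  | [], out, _, _ => out
  | (c, p) :: q, out, lo, hi =>
    if Int.ofNat c.toNat ≥ p then
      fillLoopB q (out.set lo.toNat [c]) (lo + 1) hi
    else
      fillLoopB q (out.set hi.toNat [c]) lo (hi - 1)

-- ''.join(out) = flatten of the slot char-lists
def getLastWord_alt (word : String) : String :=
  let wl := word.toList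
  let n := wl.length
  let pm := pmaxLoopB wl 0
  let out := fillLoopB ((wl.zip pm).reverse) (List.replicate n []) 0 ((n : Int) - 1)
  String.ofList out.flatten

-- ===== PRECONDITION & SPEC =====
def Spec_getLastWord (word : String) (out : String) : Prop := out = getLastWord_alt word
instance (word : String) (out : String) : Decidable (Spec_getLastWord word out) := by unfold Spec_getLastWord; infer_instance

-- ===== CLAIM (what is proved, stated in full; the proofs are below) =====
def Claim_equal_getLastWord : Prop := ∀ (word : String), Dom_getLastWord word → Spec_getLastWord word (getLastWord word)

-- ===== LEMMAS AND PROOFS =====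

-- the "record" characters (ord ≥ running max) and the others, as A classifies them
def recsC : List Char → Int → List Char
  | [], _ => []
  | c :: cs, m => if Int.ofNat c.toNat ≥ m then c :: recsC cs (Int.ofNat c.toNat) else recsC cs m

def nonrecsC : List Char → Int → List Char
  | [], _ => []
  | c :: cs, m => if Int.ofNat c.toNat ≥ m then nonrecsC cs (Int.ofNat c.toNat) else c :: nonrecsC cs m

-- the same classification read off a (char, pmax) pair list, slots as singletons
def recsE (q : List (Char × Int)) : List (List Char) :=
  q.filterMap (fun p => if Int.ofNat p.1.toNat ≥ p.2 then some [p.1] else none)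

def nonrecsE (q : List (Char × Int)) : List (List Char) :=
  q.filterMap (fun p => if Int.ofNat p.1.toNat ≥ p.2 then none else some [p.1])

-- A's loop in closed form
theorem loopA_char (cs : List Char) (m : Int) (res : List Char) (h : res ≠ []) :
    getLastWordLoopA cs m res = (recsC cs m).reverse ++ res ++ nonrecsC cs m := by
  induction cs generalizing m res with
  | nil => simp [getLastWordLoopA, recsC, nonrecsC]
  | cons c cs ih =>
    by_cases hc : Int.ofNat c.toNat ≥ m
    · simp only [getLastWordLoopA, if_neg h, if_pos hc, recsC, nonrecsC]
      rw [ih _ _ (by simp)]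
      simp
    · simp only [getLastWordLoopA, if_neg h, if_neg hc, recsC, nonrecsC]
      rw [ih _ _ (by simp [h])]
      simp

theorem pmax_length (cs : List Char) (m : Int) : (pmaxLoopB cs m).length = cs.length := by
  induction cs generalizing m with
  | nil => simp [pmaxLoopB]
  | cons c cs ih => simp [pmaxLoopB, ih]

theorem recsE_zip (cs : List Char) (m : Int) :
    recsE (cs.zip (pmaxLoopB cs m)) = (recsC cs m).map (fun c => [c]) := by
  induction cs generalizing m with
  | nil => simp [recsE, pmaxLoopB, recsC]
  | cons c cs ih =>
    by_cases hc : Int.ofNat c.toNat >= m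
    · have hm : (if Int.ofNat c.toNat > m then Int.ofNat c.toNat else m) = Int.ofNat c.toNat := by
        split <;> omega
      simp only [pmaxLoopB, hm, recsE, List.zip_cons_cons, List.filterMap_cons, recsC, if_pos hc]
      rw [<- recsE, ih]
      simp
    · have hm : (if Int.ofNat c.toNat > m then Int.ofNat c.toNat else m) = m := by
        split <;> omega
      simp only [pmaxLoopB, hm, recsE, List.zip_cons_cons, List.filterMap_cons, recsC, if_neg hc]
      rw [<- recsE, ih]

theorem nonrecsE_zip (cs : List Char) (m : Int) :
    nonrecsE (cs.zip (pmaxLoopB cs m)) = (nonrecsC cs m).map (fun c => [c]) := by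
  induction cs generalizing m with
  | nil => simp [nonrecsE, pmaxLoopB, nonrecsC]
  | cons c cs ih =>
    by_cases hc : Int.ofNat c.toNat >= m
    · have hm : (if Int.ofNat c.toNat > m then Int.ofNat c.toNat else m) = Int.ofNat c.toNat := by
        split <;> omega
      simp only [pmaxLoopB, hm, nonrecsE, List.zip_cons_cons, List.filterMap_cons, nonrecsC, if_pos hc]
      rw [<- nonrecsE, ih]
    · have hm : (if Int.ofNat c.toNat > m then Int.ofNat c.toNat else m) = m := by
        split <;> omega
      simp only [pmaxLoopB, hm, nonrecsE, List.zip_cons_cons, List.filterMap_cons, nonrecsC, if_neg hc]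
      rw [<- nonrecsE, ih]
      simp

theorem take_set_succ {α : Type} : ∀ (l : List α) (i : Nat) (a : α), i < l.length →
    (l.set i a).take (i + 1) = l.take i ++ [a]
  | [], i, a, h => by simp at h
  | x :: l, 0, a, h => by simp
  | x :: l, i + 1, a, h => by
    simp only [List.set, List.take, List.cons_append]
    rw [take_set_succ l i a (by simpa using h)]

theorem take_set_of_le {α : Type} : ∀ (l : List α) (i j : Nat) (a : α), j ≤ i →
    (l.set i a).take j = l.take j
  | [], _, _, _, _ => by simp
  | x :: l, i, 0, a, h => by simp
  | x :: l, 0, j + 1, a, h => by omega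
  | x :: l, i + 1, j + 1, a, h => by
    simp only [List.set, List.take]
    rw [take_set_of_le l i j a (by omega)]

theorem drop_set_of_lt {α : Type} : ∀ (l : List α) (i j : Nat) (a : α), i < j →
    (l.set i a).drop j = l.drop j
  | [], _, _, _, _ => by simp
  | x :: l, i, 0, a, h => by omega
  | x :: l, 0, j + 1, a, h => by simp
  | x :: l, i + 1, j + 1, a, h => by
    simp only [List.set, List.drop]
    exact drop_set_of_lt l i j a (by omega)

theorem drop_set_self {α : Type} : ∀ (l : List α) (i : Nat) (a : α), i < l.length →
    (l.set i a).drop i = a :: l.drop (i + 1)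
  | [], i, a, h => by simp at h
  | x :: l, 0, a, h => by simp
  | x :: l, i + 1, a, h => by
    simp only [List.set, List.drop]
    exact drop_set_self l i a (by simpa using h)

-- the two-pointer fill in closed form
theorem fill_spec (q : List (Char × Int)) : ∀ (out : List (List Char)) (lo hi : Int),
    0 ≤ lo → hi + 1 = lo + q.length → hi < out.length →
    fillLoopB q out lo hi
      = out.take lo.toNat ++ recsE q ++ (nonrecsE q).reverse ++ out.drop (hi + 1).toNat := by
  induction q with
  | nil =>
    intro out lo hi h0 h1 h2
    simp only [List.length_nil, Nat.cast_zero, add_zero] at h1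
    subst h1
    simp [fillLoopB, recsE, nonrecsE, List.take_append_drop]
  | cons cp q ih =>
    obtain ⟨c, p⟩ := cp
    intro out lo hi h0 h1 h2
    simp only [List.length_cons, Nat.cast_add, Nat.cast_one] at h1
    have hlo : lo <= hi := by omega
    have hlolen : lo.toNat < out.length := by omega
    have hhilen : hi.toNat < out.length := by omega
    by_cases hc : Int.ofNat c.toNat >= p
    · simp only [fillLoopB, if_pos hc]
      rw [ih (out.set lo.toNat [c]) (lo + 1) hi (by omega)
        (by omega) (by simpa using h2)]
      have h5 : ((lo + 1).toNat) = lo.toNat + 1 := by omega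
      rw [h5, take_set_succ _ _ _ hlolen,
        drop_set_of_lt _ _ _ _ (by omega)]
      simp only [recsE, nonrecsE, List.filterMap_cons, if_pos hc]
      rw [← recsE, ← nonrecsE]
      simp
    · simp only [fillLoopB, if_neg hc]
      rw [ih (out.set hi.toNat [c]) lo (hi - 1) h0
        (by omega) (by simp only [List.length_set]; omega)]
      have h6 : (hi - 1 + 1).toNat = hi.toNat := by omega
      have h7 : (hi + 1).toNat = hi.toNat + 1 := by omega
      rw [h6, take_set_of_le _ _ _ _ (by omega),
        drop_set_self _ _ _ hhilen, h7]
      simp only [recsE, nonrecsE, List.filterMap_cons, if_neg hc]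
      rw [← recsE, ← nonrecsE]
      simp

theorem flatten_map_singleton {α : Type} (l : List α) :
    (l.map (fun c => [c])).flatten = l := by
  induction l with
  | nil => rfl
  | cons x l ih => simp [ih]

-- A in closed form
theorem getLastWord_char (word : String) :
    getLastWord word = String.ofList ((recsC word.toList 0).reverse ++ nonrecsC word.toList 0) := by
  unfold getLastWord
  cases hw : word.toList with
  | nil => simp [getLastWordLoopA, recsC, nonrecsC]
  | cons c cs =>
    have h0 : Int.ofNat c.toNat ≥ (0 : Int) := Int.natCast_nonneg _
    simp only [getLastWordLoopA, reduceIte, List.nil_append]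
    rw [loopA_char cs (Int.ofNat c.toNat) [c] (by simp)]
    simp [recsC, nonrecsC]

-- B in closed form
theorem getLastWord_alt_char (word : String) :
    getLastWord_alt word = String.ofList ((recsC word.toList 0).reverse ++ nonrecsC word.toList 0) := by
  unfold getLastWord_alt
  simp only
  set wl := word.toList with hwl
  have hlen : (wl.zip (pmaxLoopB wl 0)).length = wl.length := by
    simp [pmax_length]
  rw [fill_spec ((wl.zip (pmaxLoopB wl 0)).reverse) (List.replicate wl.length []) 0
      ((wl.length : Int) - 1) (by omega)
      (by simp [hlen]) (by simp)]
  have hdrop : ((wl.length : Int) - 1 + 1).toNat = wl.length := by omega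
  rw [hdrop]
  simp only [Int.toNat_zero, List.take_zero, List.nil_append]
  rw [show List.drop wl.length (List.replicate wl.length ([] : List Char)) = [] by simp,
    List.append_nil]
  have hr : recsE ((wl.zip (pmaxLoopB wl 0)).reverse) = (recsE (wl.zip (pmaxLoopB wl 0))).reverse := by
    simp [recsE, List.filterMap_reverse]
  have hn : nonrecsE ((wl.zip (pmaxLoopB wl 0)).reverse) = (nonrecsE (wl.zip (pmaxLoopB wl 0))).reverse := by
    simp [nonrecsE, List.filterMap_reverse]
  rw [hr, hn, recsE_zip, nonrecsE_zip, List.reverse_reverse, ← List.map_reverse,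
    List.flatten_append, flatten_map_singleton, flatten_map_singleton]

-- ===== VERDICT (by name: the statement is the Claim_ definition above) =====
theorem getLastWord_spec : Claim_equal_getLastWord := by
  intro word _
  unfold Spec_getLastWord
  rw [getLastWord_char, getLastWord_alt_char]
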